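-- pv_equiv track=rewrite | github.com/jiyoulee/problem-solving-v1 | implementation/69A.py | solution
-- ===== SOURCE A (Python) =====
-- def solution(n, vectors):
--     x, y, z = 0, 0, 0
--     for vector in vectors:
--         x += vector[0]
--         y += vector[1]
--         z += vector[2]
--
--     answer = "YES" if 0 == x and 0 == y and 0 == z else "NO"
--
--     return answer
-- ===== SOURCE B (Python) =====
-- def solution(n, vectors):
--     # Pairwise (tournament) reduction: repeatedly add adjacent vectors until
--     # one total vector remains, then test it against the zero vector.
--     vs = list(vectors)
--     if not vs:
--         return "YES"
--     while len(vs) > 1: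
--         nxt = [(vs[i][0] + vs[i + 1][0],
--                 vs[i][1] + vs[i + 1][1],
--                 vs[i][2] + vs[i + 1][2])
--                for i in range(0, len(vs) - 1, 2)]
--         if len(vs) % 2:
--             nxt.append(vs[-1])
--         vs = nxt
--     x, y, z = vs[0]
--     return "YES" if x == 0 and y == 0 and z == 0 else "NO"
-- ===== Notes on version B (the rewrite author's own statement) =====
-- stated objective: alternative
-- what changed: Replaces the single linear pass with three scalar accumulators by a logarithmic-depth pairwise (tournament) reduction that repeatedly adds adjacent whole vectors until one total vector remains, then compares it with zero.
import Mathlib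
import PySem

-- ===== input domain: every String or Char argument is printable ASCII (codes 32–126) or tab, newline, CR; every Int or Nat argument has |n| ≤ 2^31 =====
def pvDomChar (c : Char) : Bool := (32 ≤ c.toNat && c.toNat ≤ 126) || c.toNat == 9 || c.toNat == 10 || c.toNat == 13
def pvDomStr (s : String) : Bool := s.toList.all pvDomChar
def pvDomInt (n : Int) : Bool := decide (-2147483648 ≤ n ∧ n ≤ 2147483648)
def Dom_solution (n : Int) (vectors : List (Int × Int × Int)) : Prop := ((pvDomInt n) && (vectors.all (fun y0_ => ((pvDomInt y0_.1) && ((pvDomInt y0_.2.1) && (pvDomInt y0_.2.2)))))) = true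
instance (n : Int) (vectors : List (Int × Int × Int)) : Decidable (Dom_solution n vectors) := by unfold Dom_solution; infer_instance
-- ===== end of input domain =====

-- B replaces A's single pass with three scalar accumulators by a pairwise
-- (tournament) reduction of whole vectors (objective: alternative).

-- ===== PORT A =====
-- literal port: loop over vectors accumulating (x, y, z), then the final test
def solution (n : Int) (vectors : List (Int × Int × Int)) : String :=
  let s := vectors.foldl
    (fun (acc : Int × Int × Int) v => (acc.1 + v.1, acc.2.1 + v.2.1, acc.2.2 + v.2.2))
    (0, 0, 0)
  if 0 == s.1 && 0 == s.2.1 && 0 == s.2.2 then "YES" else "NO"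

-- ===== PORT B =====
-- one pairing pass of B's while-loop body: add adjacent vectors, carry a
-- trailing odd element through unchanged
def pvPairUp : List (Int × Int × Int) → List (Int × Int × Int)
  | a :: b :: t => (a.1 + b.1, a.2.1 + b.2.1, a.2.2 + b.2.2) :: pvPairUp t
  | l => l

theorem pvPairUp_length_lt : ∀ (a b : Int × Int × Int) (t : List (Int × Int × Int)),
    (pvPairUp (a :: b :: t)).length < (a :: b :: t).length := by
  intro a b t
  induction t using pvPairUp.induct with
  | case1 c d t ih => simpa [pvPairUp] using Nat.lt_trans ih (Nat.lt_succ_self _)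
  | case2 l h => cases l with
    | nil => simp [pvPairUp]
    | cons c t => cases t with
      | nil => simp [pvPairUp]
      | cons d t => exact absurd rfl (h c d t)

-- the while-loop: keep pairing until one vector remains
def pvReduce : List (Int × Int × Int) → Int × Int × Int
  | [] => (0, 0, 0)      -- unreachable from solution_alt (empty case returns early)
  | [v] => v
  | a :: b :: t => pvReduce (pvPairUp (a :: b :: t))
  termination_by l => l.length
  decreasing_by exact pvPairUp_length_lt a b t

def solution_alt (n : Int) (vectors : List (Int × Int × Int)) : String :=
  if vectors.isEmpty then "YES"
  else
    let s := pvReduce vectors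
    if s.1 == 0 && s.2.1 == 0 && s.2.2 == 0 then "YES" else "NO"

-- ===== PRECONDITION & SPEC =====
def Spec_solution (n : Int) (vectors : List (Int × Int × Int)) (out : String) : Prop := out = solution_alt n vectors
instance (n : Int) (vectors : List (Int × Int × Int)) (out : String) : Decidable (Spec_solution n vectors out) := by unfold Spec_solution; infer_instance

-- ===== CLAIM (what is proved, stated in full; the proofs are below) =====
def Claim_equal_solution : Prop := ∀ (n : Int) (vectors : List (Int × Int × Int)), Dom_solution n vectors → Spec_solution n vectors (solution n vectors)

-- ===== LEMMAS AND PROOFS =====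

-- component sums of a vector list
def pvSums (l : List (Int × Int × Int)) : Int × Int × Int :=
  ((l.map (·.1)).sum, (l.map (·.2.1)).sum, (l.map (·.2.2)).sum)

-- a pairing pass preserves the component sums
theorem pvPairUp_sums : ∀ l, pvSums (pvPairUp l) = pvSums l := by
  intro l
  induction l using pvPairUp.induct with
  | case1 a b t ih => simp [pvPairUp, pvSums] at ih ⊢; refine ⟨?_, ?_, ?_⟩ <;> omega
  | case2 l h => cases l with
    | nil => rfl
    | cons a t => cases t with
      | nil => rfl
      | cons b t => exact absurd rfl (h a b t)

-- the reduction computes the component sums (on nonempty input)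
theorem pvReduce_eq : ∀ l : List (Int × Int × Int), l ≠ [] → pvReduce l = pvSums l := by
  intro l
  induction l using pvReduce.induct with
  | case1 => intro h; exact absurd rfl h
  | case2 v => intro _; simp [pvReduce, pvSums]
  | case3 a b t ih =>
    intro _
    rw [pvReduce, ← pvPairUp_sums]
    exact ih (by simp [pvPairUp])

-- A's accumulator after the loop is the triple of column sums
theorem solution_foldl_eq (vectors : List (Int × Int × Int)) (a b c : Int) :
    vectors.foldl
      (fun (acc : Int × Int × Int) v => (acc.1 + v.1, acc.2.1 + v.2.1, acc.2.2 + v.2.2))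
      (a, b, c)
    = (a + (vectors.map (·.1)).sum, b + (vectors.map (·.2.1)).sum, c + (vectors.map (·.2.2)).sum) := by
  induction vectors generalizing a b c with
  | nil => simp
  | cons v t ih => simp [List.foldl_cons, ih]; ring_nf; simp [add_comm]

-- ===== VERDICT (by name: the statement is the Claim_ definition above) =====
theorem solution_spec : Claim_equal_solution := by
  intro n vectors _
  unfold Spec_solution solution solution_alt
  by_cases h : vectors = []
  · subst h; simp
  · rw [pvReduce_eq vectors h]
    simp only [solution_foldl_eq, List.isEmpty_iff, h, if_false, pvSums, zero_add]
    have bc : ∀ x : Int, ((0 : Int) == x) = (x == 0) := by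
      intro x; by_cases hx : x = 0 <;> simp [hx] <;> omega
    simp [bc]
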